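-- pv_equiv track=rewrite | github.com/LoveElysia1314/ABACUS-STRU-Analyser | stru_nRMSD_cluster.py | get_molecular_formula
-- ===== SOURCE A (Python) =====
-- from collections import defaultdict, Counter
--
-- def get_molecular_formula(elements, exclude_hydrogen=True):
--     """根据元素列表生成分子式字符串。"""
--     if exclude_hydrogen:
--         elements = [e for e in elements if e != "H"]
--     element_counts = defaultdict(int)
--     for element in elements:
--         element_counts[element] += 1
--     formula = ""
--     for element in sorted(element_counts.keys()):
--         count = element_counts[element]
--         formula += element
--         if count > 1:
--             formula += str(count)
--     return formula
-- ===== SOURCE B (Python) =====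
-- from collections import deque
--
-- def get_molecular_formula(elements, exclude_hydrogen=True):
--     """Sorted-runs rewrite: sort the elements and emit each run directly, no count table."""
--     if exclude_hydrogen:
--         elements = [e for e in elements if e != "H"]
--     rest = deque(sorted(elements))
--     parts = []
--     while rest:
--         x = rest.popleft()
--         k = 1
--         while rest and rest[0] == x:
--             rest.popleft()
--             k += 1
--         parts.append(x if k == 1 else x + str(k))
--     return "".join(parts)
-- ===== Notes on version B (the rewrite author's own statement) =====
-- stated objective: alternative
-- what changed: Replaces the defaultdict count table plus sorted-keys pass with a single sort of the element list followed by a run-length scan that emits each group directly.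
import Mathlib
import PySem

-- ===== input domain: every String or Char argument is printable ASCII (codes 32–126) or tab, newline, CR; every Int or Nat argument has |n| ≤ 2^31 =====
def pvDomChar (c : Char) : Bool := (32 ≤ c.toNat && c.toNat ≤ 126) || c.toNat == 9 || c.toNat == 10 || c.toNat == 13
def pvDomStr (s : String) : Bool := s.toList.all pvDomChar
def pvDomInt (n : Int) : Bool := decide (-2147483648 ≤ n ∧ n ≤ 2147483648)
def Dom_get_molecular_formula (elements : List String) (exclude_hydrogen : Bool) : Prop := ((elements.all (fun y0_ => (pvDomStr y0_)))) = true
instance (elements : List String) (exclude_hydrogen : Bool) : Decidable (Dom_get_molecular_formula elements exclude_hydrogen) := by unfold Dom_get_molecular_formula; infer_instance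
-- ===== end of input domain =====

-- B replaces A's count-dict-then-sorted-keys passes by one sort followed by a run-length scan (alternative algorithm, same cost).


-- ===== PORT A =====
def get_molecular_formula (elements : List String) (exclude_hydrogen : Bool) : String :=
  let elements := if exclude_hydrogen then elements.filter (fun e => e != "H") else elements
  let element_counts := elements.foldl (fun d element => d.modify element 0 (· + 1)) PySem.Dict.empty
  let formula := (PySem.List.sorted element_counts.keys (fun k => k)).foldl
    (fun (formula : List Char) (element : String) =>
      let count := element_counts.getD element 0
      let formula := formula ++ element.toList
      if count > 1 then formula ++ PySem.Int.toChars count else formula) []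
  String.mk formula

-- ===== PORT B =====
-- inner while of B: number of leading elements of the tail equal to x (the Python's k - 1)
def pvRunLen (x : String) : List String → Nat
  | [] => 0
  | y :: ys => if y == x then pvRunLen x ys + 1 else 0

-- outer while of B over rest; emits each run and drops it
def pvRuns : List String → List Char
  | [] => []
  | x :: ys =>
      let k := pvRunLen x ys + 1
      (if k == 1 then x.toList else x.toList ++ PySem.Int.toChars (k : Int))
        ++ pvRuns (ys.drop (pvRunLen x ys))
  termination_by s => s.length
  decreasing_by simp

def get_molecular_formula_alt (elements : List String) (exclude_hydrogen : Bool) : String :=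
  let elements := if exclude_hydrogen then elements.filter (fun e => e != "H") else elements
  String.mk (pvRuns (PySem.List.sorted elements (fun k => k)))

-- ===== PRECONDITION & SPEC =====
def Spec_get_molecular_formula (elements : List String) (exclude_hydrogen : Bool) (out : String) : Prop := out = get_molecular_formula_alt elements exclude_hydrogen
instance (elements : List String) (exclude_hydrogen : Bool) (out : String) : Decidable (Spec_get_molecular_formula elements exclude_hydrogen out) := by unfold Spec_get_molecular_formula; infer_instance

-- ===== CLAIM (what is proved, stated in full; the proofs are below) =====
def Claim_equal_get_molecular_formula : Prop := ∀ (elements : List String) (exclude_hydrogen : Bool), Dom_get_molecular_formula elements exclude_hydrogen → Spec_get_molecular_formula elements exclude_hydrogen (get_molecular_formula elements exclude_hydrogen)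

-- ===== LEMMAS AND PROOFS =====

-- the per-element chunk of output both programs emit, as a function of the element's count
def pvChunk (cnt : Nat) (k : String) : List Char :=
  k.toList ++ (if (cnt : Int) > 1 then PySem.Int.toChars (cnt : Int) else [])

theorem ofList_sublist {A : Type} [BEq A] [LawfulBEq A] :
    ∀ xs : List A, (PySem.Set.ofList xs).Sublist xs := by
  intro xs; induction xs with
  | nil => simp [PySem.Set.ofList]
  | cons x xs ih =>
      rw [PySem.Set.ofList_cons]
      exact List.Sublist.cons₂ x (List.Sublist.trans (List.filter_sublist) ih)

theorem discard_ofList_of_not_mem {A : Type} [BEq A] [LawfulBEq A] (x : A) (l : List A)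
    (h : x ∉ l) : (PySem.Set.ofList l).discard x = PySem.Set.ofList l := by
  apply List.filter_eq_self.2
  intro a ha
  have ha' : a ∈ l := (PySem.Set.mem_ofList l a).1 ha
  simp only [Bool.not_eq_eq_eq_not, Bool.not_true, beq_eq_false_iff_ne]
  rintro rfl; exact h ha'

theorem ofList_replicate_append {A : Type} [BEq A] [LawfulBEq A] (x : A) (rest : List A)
    (h : x ∉ rest) : ∀ r : Nat, PySem.Set.ofList (List.replicate r x ++ rest)
      = if r = 0 then PySem.Set.ofList rest else x :: PySem.Set.ofList rest := by
  intro r; induction r with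
  | zero => simp
  | succ r ih =>
      rw [List.replicate_succ, List.cons_append, PySem.Set.ofList_cons, ih]
      by_cases hr : r = 0
      · subst hr
        simp [discard_ofList_of_not_mem x rest h]
      · rw [if_neg hr, if_neg (Nat.succ_ne_zero r)]
        unfold PySem.Set.discard
        rw [List.filter_cons_of_neg (by simp)]
        rw [show List.filter (fun y => !y == x) (PySem.Set.ofList rest)
              = (PySem.Set.ofList rest).discard x from rfl]
        rw [discard_ofList_of_not_mem x rest h]

theorem pvRun_decomp (x : String) :
    ∀ ys : List String, (x :: ys).Pairwise (· ≤ ·) →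
      ys = List.replicate (pvRunLen x ys) x ++ ys.drop (pvRunLen x ys) ∧
      x ∉ ys.drop (pvRunLen x ys) := by
  intro ys
  induction ys with
  | nil => simp [pvRunLen]
  | cons y ys ih =>
      intro hp
      by_cases hyx : y = x
      · subst hyx
        obtain ⟨h1, h2⟩ := ih hp.of_cons
        simp only [pvRunLen, beq_self_eq_true, if_pos, List.replicate_succ,
          List.cons_append, List.drop_succ_cons]
        exact ⟨by rw [← h1], h2⟩
      · have hne : (y == x) = false := beq_eq_false_iff_ne.2 hyx
        simp only [pvRunLen, hne, Bool.false_eq_true, if_neg, List.replicate_zero,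
          List.nil_append, List.drop_zero]
        refine ⟨rfl, ?_⟩
        have hx_le : ∀ a ∈ y :: ys, x ≤ a := (List.pairwise_cons.1 hp).1
        have hxy : x < y := lt_of_le_of_ne (hx_le y (by simp)) (Ne.symm hyx)
        have hyall : ∀ a ∈ ys, y ≤ a := (List.pairwise_cons.1 hp.of_cons).1
        intro hmem
        rcases List.mem_cons.1 hmem with h | h
        · exact hyx (Eq.symm h)
        · exact absurd (lt_of_lt_of_le hxy (hyall x h)) (lt_irrefl x)

theorem pvRuns_sorted : ∀ (n : Nat) (s : List String), s.length ≤ n → s.Pairwise (· ≤ ·) →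
    pvRuns s = (PySem.Set.ofList s).flatMap (fun k => pvChunk (s.count k) k) := by
  intro n
  induction n with
  | zero =>
      intro s hlen _
      have : s = [] := List.eq_nil_of_length_eq_zero (Nat.le_zero.1 hlen)
      subst this; simp [pvRuns, PySem.Set.ofList]
  | succ n ih =>
      intro s hlen hs
      cases s with
      | nil => simp [pvRuns, PySem.Set.ofList]
      | cons x ys =>
          obtain ⟨hdec, hnm⟩ := pvRun_decomp x ys hs
          set r := pvRunLen x ys with hr
          set rest := ys.drop r with hrest
          have hsx : x :: ys = List.replicate (r + 1) x ++ rest := by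
            rw [List.replicate_succ, List.cons_append]; exact congrArg (List.cons x) hdec
          have hrest_sorted : rest.Pairwise (· ≤ ·) :=
            List.Pairwise.sublist (List.drop_sublist r ys) hs.of_cons
          have hrest_len : rest.length ≤ n := by
            have h1 : ys.length ≤ n := Nat.lt_succ_iff.1 (Nat.lt_of_lt_of_le (by simp) hlen)
            calc rest.length ≤ ys.length := by rw [hrest]; exact (List.length_drop ..).le.trans (Nat.sub_le _ _)
              _ ≤ n := h1
          have hcount_x : (x :: ys).count x = r + 1 := by
            rw [hsx, List.count_append, List.count_eq_zero_of_not_mem hnm]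
            simp
          have hcount_ne : ∀ k, k ≠ x → (x :: ys).count k = rest.count k := by
            intro k hk
            rw [hsx, List.count_append]
            simp [List.count_replicate, Ne.symm hk]
          have hofl : PySem.Set.ofList (x :: ys) = x :: PySem.Set.ofList rest := by
            rw [hsx, ofList_replicate_append x rest hnm (r + 1), if_neg (Nat.succ_ne_zero r)]
          -- unfold one step of pvRuns
          conv_lhs => rw [pvRuns]
          simp only [← hr]
          rw [ih rest hrest_len hrest_sorted, hofl, List.flatMap_cons]
          congr 1
          · -- emitted chunk for x
            rw [hcount_x]
            by_cases h0 : r = 0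
            · simp [h0, pvChunk]
            · have : ((r + 1 : Nat) == 1) = false := by
                simp only [beq_eq_false_iff_ne, ne_eq]; omega
              rw [if_neg (by simp [this])]
              simp only [pvChunk, if_pos (by push_cast; omega : ((r + 1 : Nat) : Int) > 1)]
          · -- remaining chunks: counts agree
            apply List.flatMap_congr
            intro k hkmem
            have hkrest : k ∈ rest := (PySem.Set.mem_ofList rest k).1 hkmem
            have hkx : k ≠ x := fun h => hnm (h ▸ hkrest)
            rw [hcount_ne k hkx]

theorem foldl_chunk (f : String → Int) (l : List String) (acc : List Char) :
    l.foldl (fun (formula : List Char) (element : String) =>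
      if f element > 1 then (formula ++ element.toList) ++ PySem.Int.toChars (f element)
      else formula ++ element.toList) acc
    = acc ++ l.flatMap (fun k => k.toList ++ (if f k > 1 then PySem.Int.toChars (f k) else [])) := by
  induction l generalizing acc with
  | nil => simp
  | cons x l ihl =>
      simp only [List.foldl_cons, List.flatMap_cons]
      rw [ihl]
      by_cases h : f x > 1 <;> simp [h, List.append_assoc]

theorem ofList_sorted_eq (l : List String) :
    PySem.Set.ofList (PySem.List.sorted l (fun k => k))
      = PySem.List.sorted (PySem.Set.ofList l) (fun k => k) := by
  symm
  apply PySem.List.sorted_eq_of_perm_of_pairwise_lt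
  · refine (List.perm_ext_iff_of_nodup (PySem.Set.nodup_ofList _) (PySem.Set.nodup_ofList _)).2 ?_
    intro a
    rw [PySem.Set.mem_ofList, PySem.Set.mem_ofList, PySem.List.mem_sorted]
  · have hle : (PySem.Set.ofList (PySem.List.sorted l (fun k => k))).Pairwise (· ≤ ·) :=
      List.Pairwise.sublist (ofList_sublist _) (PySem.List.sorted_pairwise l (fun k => k))
    have hnd : (PySem.Set.ofList (PySem.List.sorted l (fun k => k))).Nodup :=
      PySem.Set.nodup_ofList _
    exact (hle.and hnd).imp (fun h => lt_of_le_of_ne h.1 h.2)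

-- ===== VERDICT (by name: the statement is the Claim_ definition above) =====
theorem get_molecular_formula_spec : Claim_equal_get_molecular_formula := by
  intro elements eh _
  unfold Spec_get_molecular_formula
  simp only [get_molecular_formula, get_molecular_formula_alt]
  rw [← PySem.Dict.counter_eq_foldl, PySem.Dict.keys_counter]
  rw [foldl_chunk (fun element =>
    (PySem.Dict.counter (if eh = true then elements.filter (fun e => e != "H") else elements)).getD element 0)]
  rw [pvRuns_sorted _ _ (le_refl _) (PySem.List.sorted_pairwise _ _)]
  rw [ofList_sorted_eq]
  congr 1
  rw [List.nil_append]
  apply List.flatMap_congr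
  intro k _
  rw [PySem.Dict.getD_counter]
  have hc : List.count k (PySem.List.sorted
      (if eh = true then elements.filter (fun e => e != "H") else elements) (fun k => k))
      = List.count k (if eh = true then elements.filter (fun e => e != "H") else elements) :=
    (PySem.List.sorted_perm _ _ _).count_eq k
  rw [pvChunk, hc]
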